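-- pv_equiv track=rewrite | github.com/LeytonYu/python_algorithm | 算法/在整型数组中构建元素之和能整除数组商都的子集.py | findModuleSubSet
-- ===== SOURCE A (Python) =====
-- def findModuleSubSet(A):
--     boxes = [0] * len(A)
--     sum = 0
--     subSet = []
--     for k in range(len(A)):
--         sum += A[k]
--         subSet.append(k)
--         t = sum % len(A)
--         if t == 0:
--             return subSet
--         if boxes[t] != 0:
--             preSum = 0
--             for i in range(k + 1):
--                 preSum += A[i]
--                 if preSum % len(A) == t:
--                     return subSet[i + 1:]
--         boxes[t] = 1
--     return []
-- ===== SOURCE B (Python) =====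
-- def findModuleSubSet(A):
--     n = len(A)
--     first = {0: -1}
--     s = 0
--     for k in range(n):
--         s += A[k]
--         r = s % n
--         if r in first:
--             return list(range(first[r] + 1, k + 1))
--         first[r] = k
--     return []
-- ===== Notes on version B (the rewrite author's own statement) =====
-- stated objective: simpler
-- what changed: Replaced the 0/1 flag array plus nested prefix-sum rescan with a single-pass dict mapping each prefix-sum remainder to its first index (seeded {0:-1}), so the answer interval is produced directly by range() with no inner loop.
import Mathlib
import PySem

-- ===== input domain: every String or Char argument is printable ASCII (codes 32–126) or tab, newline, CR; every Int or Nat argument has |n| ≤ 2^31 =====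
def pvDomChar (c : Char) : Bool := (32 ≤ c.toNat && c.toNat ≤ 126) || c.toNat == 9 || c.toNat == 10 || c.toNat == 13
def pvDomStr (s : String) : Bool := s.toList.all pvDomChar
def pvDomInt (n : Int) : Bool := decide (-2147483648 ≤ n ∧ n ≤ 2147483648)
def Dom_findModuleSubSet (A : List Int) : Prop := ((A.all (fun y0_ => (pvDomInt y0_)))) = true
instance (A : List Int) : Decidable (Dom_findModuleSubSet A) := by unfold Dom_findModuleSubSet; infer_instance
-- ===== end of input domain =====

-- B replaces A's 0/1 flag array and nested prefix-sum rescan with a single-pass dict of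
-- first remainder occurrences seeded {0:-1}; objective: simpler (no inner loop).

-- ===== PORT A =====
-- inner rescan: 'for i in range(k+1): preSum += A[i]; if preSum % len(A) == t: return subSet[i+1:]'
def pvInnerA (A : List Int) (n : Nat) (t : Int) (subSet : List Int) :
    List Nat → Int → Option (List Int)
  | [], _ => none
  | i :: is, preSum =>
    let preSum' := preSum + PySem.List.pyGetD A (i : Int) 0
    if PySem.Int.mod preSum' (n : Int) = t then
      some (PySem.List.slice subSet (some ((i : Int) + 1)) none)
    else pvInnerA A n t subSet is preSum'

-- outer loop: 'for k in range(len(A)): …'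
def pvLoopA (A : List Int) (n : Nat) :
    List Nat → List Int → Int → List Int → List Int
  | [], _, _, _ => []
  | k :: ks, boxes, sum, subSet =>
    let sum' := sum + PySem.List.pyGetD A (k : Int) 0
    let subSet' := subSet ++ [(k : Int)]
    let t := PySem.Int.mod sum' (n : Int)
    if t = 0 then subSet'
    else if PySem.List.pyGetD boxes t 0 ≠ 0 then
      match pvInnerA A n t subSet' (List.range (k + 1)) 0 with
      | some r => r
      | none => pvLoopA A n ks (PySem.List.pySetD boxes t 1) sum' subSet'
    else pvLoopA A n ks (PySem.List.pySetD boxes t 1) sum' subSet'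

def findModuleSubSet (A : List Int) : List Int :=
  pvLoopA A A.length (List.range A.length) (List.replicate A.length 0) 0 []

-- ===== PORT B =====
def pvLoopB (A : List Int) (n : Nat) :
    List Nat → PySem.Dict Int Int → Int → List Int
  | [], _, _ => []
  | k :: ks, first, s =>
    let s' := s + PySem.List.pyGetD A (k : Int) 0
    let r := PySem.Int.mod s' (n : Int)
    match first.get? r with
    | some v => PySem.List.pyRange (v + 1) ((k : Int) + 1) 1
    | none => pvLoopB A n ks (first.insert r (k : Int)) s'

def findModuleSubSet_alt (A : List Int) : List Int :=
  pvLoopB A A.length (List.range A.length) (PySem.Dict.ofList [(0, -1)]) 0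

-- ===== PRECONDITION & SPEC =====
def Spec_findModuleSubSet (A : List Int) (out : List Int) : Prop := out = findModuleSubSet_alt A
instance (A : List Int) (out : List Int) : Decidable (Spec_findModuleSubSet A out) := by unfold Spec_findModuleSubSet; infer_instance

-- ===== CLAIM (what is proved, stated in full; the proofs are below) =====
def Claim_equal_findModuleSubSet : Prop := ∀ (A : List Int), Dom_findModuleSubSet A → Spec_findModuleSubSet A (findModuleSubSet A)

-- ===== LEMMAS AND PROOFS =====

-- prefix sum of the first k elements, and remainder of the prefix ending at index j
def pvS (A : List Int) (k : Nat) : Int := (A.take k).sum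
def pvRem (A : List Int) (j : Nat) : Int := PySem.Int.mod (pvS A (j + 1)) (A.length : Int)

-- what B's dict holds after processing indices < k
def pvDGet (A : List Int) (k : Nat) (r : Int) : Option Int :=
  if r = 0 then some (-1)
  else ((List.range k).find? (fun j => decide (pvRem A j = r))).map (fun j => Int.ofNat j)

lemma pvS_succ (A : List Int) (i : Nat) (h : i < A.length) :
    pvS A (i + 1) = pvS A i + A[i] := by
  simp [pvS, List.sum_take_succ _ _ h]

lemma pvGetD_step (A : List Int) (i : Nat) (h : i < A.length) :
    pvS A i + PySem.List.pyGetD A (i : Int) 0 = pvS A (i + 1) := by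
  rw [PySem.List.pyGetD_natCast, List.getD_eq_getElem A 0 h, pvS_succ A i h]

lemma find?_range_eq_some {p : Nat → Bool} {k i0 : Nat} (h1 : i0 < k) (h2 : p i0 = true)
    (h3 : ∀ j < i0, p j = false) : (List.range k).find? p = some i0 := by
  induction k with
  | zero => omega
  | succ k ih =>
    rw [List.range_succ, List.find?_append]
    rcases Nat.lt_or_ge i0 k with h | h
    · rw [ih h]; rfl
    · have hek : i0 = k := by omega
      subst hek
      have hnone : (List.range i0).find? p = none := by
        rw [List.find?_eq_none]
        intro x hx
        simp only [List.mem_range] at hx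
        simp [h3 x hx]
      simp [hnone, h2]

-- appending the next index extends the mapped range
lemma pvCast_succ (k : Nat) :
    (List.range k).map (fun j => Int.ofNat j) ++ [(k : Int)] =
      (List.range (k + 1)).map (fun j => Int.ofNat j) := by
  rw [List.range_succ, List.map_append]; rfl

-- [a, …, k] as a list of Ints: drop on the mapped range equals Python's range()
lemma pvInterval (a k : Nat) (h : a ≤ k + 1) :
    ((List.range (k + 1)).map (fun j => Int.ofNat j)).drop a =
      PySem.List.pyRange (a : Int) ((k : Int) + 1) 1 := by
  rw [PySem.List.pyRange_one, ← List.map_drop, List.range_eq_range', List.drop_range',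
    List.range'_eq_map_range, List.map_map]
  have h2 : ((k : Int) + 1 - (a : Int)).toNat = k + 1 - a := by omega
  rw [h2]
  apply List.map_congr_left
  intro x _
  simp only [Function.comp_apply, Int.ofNat_eq_natCast]
  push_cast
  ring

lemma pvInnerA_eq (A : List Int) (t : Int) (subSet : List Int) :
    ∀ (m i : Nat), i + m ≤ A.length →
    ∀ (i0 : Nat), i ≤ i0 → i0 < i + m → pvRem A i0 = t →
    (∀ j, i ≤ j → j < i0 → pvRem A j ≠ t) →
    pvInnerA A A.length t subSet (List.range' i m) (pvS A i) =
      some (PySem.List.slice subSet (some ((i0 : Int) + 1)) none) := by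
  intro m
  induction m with
  | zero => intro i _ i0 h1 h2; omega
  | succ m ih =>
    intro i hlen i0 h1 h2 hrem hmin
    have hi : i < A.length := by omega
    rw [List.range'_succ]
    simp only [pvInnerA, pvGetD_step A i hi]
    rcases eq_or_lt_of_le h1 with heq | hlt
    · subst heq
      rw [if_pos (by exact hrem)]
    · rw [if_neg (by exact hmin i le_rfl hlt)]
      exact ih (i + 1) (by omega) i0 (by omega) (by omega) hrem
        (fun j hj1 hj2 => hmin j (by omega) hj2)

lemma pvDict_ofList_get (A : List Int) (r : Int) :
    (PySem.Dict.ofList [((0 : Int), (-1 : Int))]).get? r = pvDGet A 0 r := by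
  have he : PySem.Dict.ofList [((0 : Int), (-1 : Int))] =
      PySem.Dict.empty.insert 0 (-1) := by decide
  rw [he, PySem.Dict.get?_insert]
  by_cases h : r = 0
  · rw [if_pos h]; simp [pvDGet, h]
  · rw [if_neg h]; simp [pvDGet, h, PySem.Dict.get?_empty]

lemma pvLoop_eq (A : List Int) (hn : 0 < A.length) :
    ∀ (m k : Nat), k + m = A.length →
    ∀ (boxes subSet : List Int) (first : PySem.Dict Int Int),
    subSet = (List.range k).map (fun j => Int.ofNat j) →
    boxes.length = A.length →
    (∀ t : Int, 0 ≤ t → t < (A.length : Int) →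
        ((PySem.List.pyGetD boxes t 0 ≠ 0) ↔ ∃ j < k, pvRem A j = t)) →
    (∀ j < k, pvRem A j ≠ 0) →
    (∀ r : Int, first.get? r = pvDGet A k r) →
    pvLoopA A A.length (List.range' k m) boxes (pvS A k) subSet =
      pvLoopB A A.length (List.range' k m) first (pvS A k) := by
  intro m
  induction m with
  | zero => intro k _ boxes subSet first _ _ _ _ _; simp [pvLoopA, pvLoopB]
  | succ m ih =>
    intro k hk boxes subSet first hsub hlen hbox hnz hdict
    have hkA : k < A.length := by omega
    have hnI : (0 : Int) < (A.length : Int) := by exact_mod_cast hn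
    rw [List.range'_succ]
    simp only [pvLoopA, pvLoopB, pvGetD_step A k hkA]
    have hr : PySem.Int.mod (pvS A (k + 1)) ((A.length : Nat) : Int) = pvRem A k := rfl
    rw [hr]
    have ht0 : 0 ≤ pvRem A k := PySem.Int.mod_nonneg _ hnI
    have htlt : pvRem A k < (A.length : Int) := PySem.Int.mod_lt _ hnI
    by_cases h0 : pvRem A k = 0
    · have hd : pvDGet A k (pvRem A k) = some (-1) := by simp [pvDGet, h0]
      rw [if_pos h0]
      simp only [hdict, hd]
      rw [hsub, pvCast_succ,
        show ((-1 : Int) + 1) = ((0 : Nat) : Int) by norm_num,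
        ← pvInterval 0 k (by omega), List.drop_zero]
    · rw [if_neg h0]
      by_cases hex : ∃ j < k, pvRem A j = pvRem A k
      · rw [if_pos ((hbox _ ht0 htlt).mpr hex)]
        have hexP : ∃ j, j < k ∧ pvRem A j = pvRem A k := by
          obtain ⟨j, hj, he⟩ := hex; exact ⟨j, hj, he⟩
        have hi0k : Nat.find hexP < k := (Nat.find_spec hexP).1
        have hi0rem : pvRem A (Nat.find hexP) = pvRem A k := (Nat.find_spec hexP).2
        set i0 := Nat.find hexP with hi0
        have hmin : ∀ j < i0, pvRem A j ≠ pvRem A k := by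
          intro j hj hc
          exact Nat.find_min hexP hj ⟨by omega, hc⟩
        have hfind : (List.range k).find? (fun j => decide (pvRem A j = pvRem A k)) =
            some i0 :=
          find?_range_eq_some hi0k (by simp [hi0rem]) (fun j hj => by simp [hmin j hj])
        have hd2 : pvDGet A k (pvRem A k) = some (Int.ofNat i0) := by
          simp [pvDGet, h0, hfind]
        have hinner := pvInnerA_eq A (pvRem A k) (subSet ++ [(k : Int)]) (k + 1) 0
          (by omega) i0 (Nat.zero_le _) (by omega) hi0rem (fun j _ hj => hmin j hj)
        rw [← List.range_eq_range'] at hinner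
        rw [show pvS A 0 = (0 : Int) by simp [pvS]] at hinner
        simp only [hinner, hdict, hd2]
        rw [hsub, pvCast_succ,
          show ((i0 : Int) + 1) = (((i0 + 1 : Nat)) : Int) by omega,
          show (Int.ofNat i0 + 1) = (((i0 + 1 : Nat)) : Int) by simp only [Int.ofNat_eq_natCast]; omega,
          PySem.List.slice_from_natCast]
        exact pvInterval (i0 + 1) k (by omega)
      · rw [if_neg (by simpa using (hbox _ ht0 htlt).not.mpr hex)]
        have hfindn : (List.range k).find? (fun j => decide (pvRem A j = pvRem A k)) =
            none := by
          rw [List.find?_eq_none]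
          intro x hx
          simp only [List.mem_range] at hx
          simp only [decide_eq_true_eq]
          exact fun hc => hex ⟨x, hx, hc⟩
        have hd3 : pvDGet A k (pvRem A k) = none := by simp [pvDGet, h0, hfindn]
        simp only [hdict, hd3]
        apply ih (k + 1) (by omega)
        · rw [hsub, pvCast_succ]
        · rw [PySem.List.pySetD_of_nonneg _ _ ht0, List.length_set, hlen]
        · intro t htn htl
          rw [PySem.List.pySetD_of_nonneg _ _ ht0,
            PySem.List.pyGetD_eq_getElem _ _ htn
              (by rw [List.length_set, hlen]; exact_mod_cast htl),
            List.getElem_set]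
          by_cases hrt : t = pvRem A k
          · subst hrt
            rw [if_pos (by omega)]
            constructor
            · intro _; exact ⟨k, by omega, rfl⟩
            · intro _; norm_num
          · rw [if_neg (by omega)]
            rw [← PySem.List.pyGetD_eq_getElem boxes 0 htn
                  (by rw [hlen]; exact_mod_cast htl)]
            rw [hbox t htn htl]
            constructor
            · rintro ⟨j, hj, he⟩; exact ⟨j, by omega, he⟩
            · rintro ⟨j, hj, he⟩
              refine ⟨j, ?_, he⟩
              rcases Nat.lt_or_ge j k with h | h
              · omega
              · exfalso
                have hjk : j = k := by omega
                subst hjk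
                exact hrt he.symm
        · intro j hj
          rcases Nat.lt_or_ge j k with h | h
          · exact hnz j h
          · have hjk : j = k := by omega
            subst hjk
            exact h0
        · intro r
          rw [PySem.Dict.get?_insert]
          by_cases hre : r = pvRem A k
          · subst hre
            rw [if_pos rfl]
            simp only [pvDGet, if_neg h0, List.range_succ, List.find?_append, hfindn,
              Option.none_or]
            simp [List.find?]
          · rw [if_neg hre, hdict]
            by_cases hr0 : r = 0
            · simp [pvDGet, hr0]
            · simp only [pvDGet, if_neg hr0, List.range_succ, List.find?_append]
              have hnone : List.find? (fun j => decide (pvRem A j = r)) [k] = none := by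
                have hdec : decide (pvRem A k = r) = false :=
                  decide_eq_false (fun hc => hre hc.symm)
                simp [List.find?, hdec]
              rw [hnone, Option.or_none]

-- ===== VERDICT (by name: the statement is the Claim_ definition above) =====
theorem findModuleSubSet_spec : Claim_equal_findModuleSubSet := by
  intro A _
  unfold Spec_findModuleSubSet findModuleSubSet findModuleSubSet_alt
  rcases Nat.eq_zero_or_pos A.length with h | h
  · simp [h, pvLoopA, pvLoopB]
  · have hmain := pvLoop_eq A h A.length 0 (by omega)
      (List.replicate A.length 0) [] (PySem.Dict.ofList [(0, -1)])
      (by simp)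
      (by simp)
      (by
        intro t ht1 ht2
        rw [PySem.List.pyGetD_eq_getElem _ _ ht1
          (by rw [List.length_replicate]; exact_mod_cast ht2)]
        simp)
      (by omega)
      (fun r => pvDict_ofList_get A r)
    rw [show (0 : Int) = pvS A 0 by simp [pvS], List.range_eq_range']
    exact hmain
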